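-- pv_equiv track=rewrite | github.com/ivi982010/SySdL-TPs | Lexer.py | a_OpRel3
-- ===== SOURCE A (Python) =====
-- def a_OpRel3(tokens, acu):
-- 	s=0;
-- 	for c in acu:
-- 		if s==0 and c=='>':
-- 			s=1
-- 		else:
-- 			s=-1
-- 			break
-- 	if s==2:
-- 		tokens.append(("<OpRel>",acu))
-- 	return s==1
-- ===== SOURCE B (Python) =====
-- def a_OpRel3(tokens, acu):
--     # The state machine accepts exactly the one-character string ">"
--     # and never mutates tokens (the s==2 branch is unreachable).
--     return acu == ">"
-- ===== Notes on version B (the rewrite author's own statement) =====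
-- stated objective: simpler
-- what changed: Replaced the per-character state-machine loop (whose s==2 append branch is unreachable) by the closed-form equality acu == '>'.
import Mathlib
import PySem

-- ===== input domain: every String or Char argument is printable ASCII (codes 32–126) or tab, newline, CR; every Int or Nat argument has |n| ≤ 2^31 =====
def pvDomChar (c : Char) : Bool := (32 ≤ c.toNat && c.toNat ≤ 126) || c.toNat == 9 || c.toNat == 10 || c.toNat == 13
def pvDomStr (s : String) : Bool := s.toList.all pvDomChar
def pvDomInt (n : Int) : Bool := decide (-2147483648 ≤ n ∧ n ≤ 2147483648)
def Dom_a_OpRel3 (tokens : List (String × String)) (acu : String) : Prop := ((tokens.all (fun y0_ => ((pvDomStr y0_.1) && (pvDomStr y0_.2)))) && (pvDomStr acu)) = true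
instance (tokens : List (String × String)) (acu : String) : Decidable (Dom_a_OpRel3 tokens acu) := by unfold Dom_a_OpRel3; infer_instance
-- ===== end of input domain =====

-- B replaces A's per-character state-machine loop by the closed-form test acu = ">"
-- (the machine accepts exactly ">"; A's s==2 append branch is unreachable, so tokens is never mutated).
-- Equivalence is about the return value; neither program mutates tokens on any input.

-- ===== PORT A =====
-- the for-loop over acu with early break: state s, set to 1 on the first '>' from state 0,
-- otherwise set to -1 and break.
def aOpRel3Loop (s : Int) (cs : List Char) : Int :=
  match cs with
  | [] => s
  | c :: rest => if s = 0 ∧ c = '>' then aOpRel3Loop 1 rest else -1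

def a_OpRel3 (_tokens : List (String × String)) (acu : String) : Bool :=
  let s := aOpRel3Loop 0 acu.toList
  -- `if s == 2: tokens.append(...)` — s is never 2, and the return value does not depend on tokens
  s == 1

-- ===== PORT B =====
def a_OpRel3_alt (_tokens : List (String × String)) (acu : String) : Bool :=
  acu == ">"

-- ===== PRECONDITION & SPEC =====
def Spec_a_OpRel3 (tokens : List (String × String)) (acu : String) (out : Bool) : Prop := out = a_OpRel3_alt tokens acu
instance (tokens : List (String × String)) (acu : String) (out : Bool) : Decidable (Spec_a_OpRel3 tokens acu out) := by unfold Spec_a_OpRel3; infer_instance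

-- ===== CLAIM (what is proved, stated in full; the proofs are below) =====
def Claim_equal_a_OpRel3 : Prop := ∀ (tokens : List (String × String)) (acu : String), Dom_a_OpRel3 tokens acu → Spec_a_OpRel3 tokens acu (a_OpRel3 tokens acu)

-- ===== LEMMAS AND PROOFS =====

-- The loop started in state 0 yields 1 exactly on the single-character list ['>'].
theorem aOpRel3Loop_eq_one (cs : List Char) : (aOpRel3Loop 0 cs == 1) = (cs == ['>']) := by
  cases cs with
  | nil => simp [aOpRel3Loop]
  | cons c rest =>
    by_cases hc : c = '>'
    · subst hc
      cases rest with
      | nil => simp [aOpRel3Loop]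
      | cons d rest' => simp [aOpRel3Loop]
    · simp [aOpRel3Loop, hc]

theorem string_eq_gt_iff (acu : String) : (acu == ">") = (acu.toList == ['>']) := by
  have h : (">" : String).toList = ['>'] := by decide
  rw [← h]
  cases hb : acu == ">"
  · cases ht : acu.toList == (">" : String).toList
    · rfl
    · exfalso
      have : acu = ">" := by
        have := of_decide_eq_true (by simpa using ht)
        exact String.toList_inj.mp this
      simp [this] at hb
  · have : acu = ">" := of_decide_eq_true (by simpa using hb)
    simp [this]

-- ===== VERDICT (by name: the statement is the Claim_ definition above) =====
theorem a_OpRel3_spec : Claim_equal_a_OpRel3 := by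
  intro tokens acu _
  unfold Spec_a_OpRel3 a_OpRel3 a_OpRel3_alt
  rw [string_eq_gt_iff]
  exact aOpRel3Loop_eq_one acu.toList
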